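-- pv_equiv track=rewrite | github.com/RobotSe7en/helm-agent | helm/tools/toolsets.py | expand_toolsets
-- ===== SOURCE A (Python) =====
-- DEFAULT_TOOLSETS: dict[str, list[str]] = {
--     "filesystem": ["filesystem.list", "filesystem.read", "filesystem.write"],
--     "shell": ["shell.run"],
--     "git": ["git.status", "git.diff"],
--     "delegation": ["delegate_task"],
-- }
--
-- def expand_toolsets(toolsets: list[str]) -> list[str]:
--     names: list[str] = []
--     for item in toolsets:
--         if item in DEFAULT_TOOLSETS:
--             names.extend(DEFAULT_TOOLSETS[item])
--         else:
--             names.append(item)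
--     return list(dict.fromkeys(names))
-- ===== SOURCE B (Python) =====
-- DEFAULT_TOOLSETS: dict[str, list[str]] = {
--     "filesystem": ["filesystem.list", "filesystem.read", "filesystem.write"],
--     "shell": ["shell.run"],
--     "git": ["git.status", "git.diff"],
--     "delegation": ["delegate_task"],
-- }
--
-- def expand_toolsets(toolsets: list[str]) -> list[str]:
--     # Right fold: build the answer back-to-front. Each step prepends the current
--     # item's expansion and filters the already-built tail against it; correctness:
--     # first-occurrence dedup of a ++ b equals a ++ (dedup b with a's elements removed),
--     # and each expansion list is itself duplicate-free.
--     result: list[str] = []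
--     for item in reversed(toolsets):
--         head = DEFAULT_TOOLSETS.get(item, [item])
--         result = head + [x for x in result if x not in head]
--     return result
-- ===== Notes on version B (the rewrite author's own statement) =====
-- stated objective: alternative
-- what changed: Replaces A's forward two-pass (build a flat names list, then dedup it with dict.fromkeys) by a right fold that builds the answer back-to-front with no dedup pass and no hash: each step prepends the item's expansion and filters the already-built tail against it.
import Mathlib
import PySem

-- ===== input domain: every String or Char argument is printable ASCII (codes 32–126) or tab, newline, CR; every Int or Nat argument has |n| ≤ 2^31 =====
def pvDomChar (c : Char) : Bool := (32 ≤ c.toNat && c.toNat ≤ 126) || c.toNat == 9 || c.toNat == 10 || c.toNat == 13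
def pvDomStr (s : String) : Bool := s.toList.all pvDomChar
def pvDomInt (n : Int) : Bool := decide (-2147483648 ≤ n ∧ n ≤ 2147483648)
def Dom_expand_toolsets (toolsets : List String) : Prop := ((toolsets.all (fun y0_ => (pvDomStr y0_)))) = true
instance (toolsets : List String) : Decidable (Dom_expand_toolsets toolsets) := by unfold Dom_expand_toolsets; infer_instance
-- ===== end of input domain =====

-- B builds the answer back-to-front by a right fold (prepend expansion, filter the tail
-- against it) instead of A's forward build + dict.fromkeys dedup; objective: alternative.


-- ===== PORT A =====
def DEFAULT_TOOLSETS : PySem.Dict String (List String) := PySem.Dict.mk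
  [("filesystem", ["filesystem.list", "filesystem.read", "filesystem.write"]),
   ("shell", ["shell.run"]),
   ("git", ["git.status", "git.diff"]),
   ("delegation", ["delegate_task"])]

def expand_toolsets (toolsets : List String) : List String :=
  let names : List String :=
    toolsets.foldl (fun names item =>
      match DEFAULT_TOOLSETS.get? item with
      | some v => names ++ v          -- item in DEFAULT_TOOLSETS: names.extend(DEFAULT_TOOLSETS[item])
      | none   => names ++ [item]) [] -- else: names.append(item)
  PySem.List.dedup names              -- list(dict.fromkeys(names))

-- ===== PORT B =====
def expand_toolsets_alt (toolsets : List String) : List String :=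
  toolsets.reverse.foldl (fun result item =>     -- for item in reversed(toolsets)
    let head := DEFAULT_TOOLSETS.getD item [item]
    head ++ result.filter (fun x => !head.contains x)) []

-- ===== PRECONDITION & SPEC =====
def Spec_expand_toolsets (toolsets : List String) (out : List String) : Prop := out = expand_toolsets_alt toolsets
instance (toolsets : List String) (out : List String) : Decidable (Spec_expand_toolsets toolsets out) := by unfold Spec_expand_toolsets; infer_instance

-- ===== CLAIM (what is proved, stated in full; the proofs are below) =====
def Claim_equal_expand_toolsets : Prop := ∀ (toolsets : List String), Dom_expand_toolsets toolsets → Spec_expand_toolsets toolsets (expand_toolsets toolsets)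

-- ===== LEMMAS AND PROOFS =====

-- A's expansion of one item (branch on membership) computes the dict's getD with default [item].
lemma expA_eq_getD (item : String) :
    (match DEFAULT_TOOLSETS.get? item with
     | some v => v
     | none   => [item]) = DEFAULT_TOOLSETS.getD item [item] := by
  simp [PySem.Dict.getD]
  cases DEFAULT_TOOLSETS.get? item <;> rfl

-- A's names accumulator is append-structured, so it factors through flatMap.
lemma names_eq (ts : List String) (acc : List String) :
    ts.foldl (fun names item =>
      match DEFAULT_TOOLSETS.get? item with
      | some v => names ++ v
      | none   => names ++ [item]) acc
    = acc ++ ts.flatMap (fun item => DEFAULT_TOOLSETS.getD item [item]) := by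
  induction ts generalizing acc with
  | nil => simp
  | cons t ts ih =>
      simp only [List.foldl_cons, List.flatMap_cons]
      rw [← expA_eq_getD t]
      cases DEFAULT_TOOLSETS.get? t <;> simp [ih, List.append_assoc]

-- Adding to the empty set yields a singleton.
lemma add_nil (x : String) : PySem.Set.add ([] : List String) x = [x] := by
  simp [PySem.Set.add, PySem.Set.contains]

-- Relative dedup: folding Set.add from seed s deduplicates b against s.
lemma foldl_add_rel (b : List String) (s : List String) :
    b.foldl PySem.Set.add s
      = s ++ (PySem.List.dedup b).filter (fun x => !s.contains x) := by
  induction b generalizing s with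
  | nil => simp [PySem.List.dedup, PySem.Set.ofList]
  | cons x bs ih =>
      rw [PySem.List.dedup_eq_ofList] at *
      simp only [List.foldl_cons]
      rw [ih (PySem.Set.add s x)]
      rw [show (PySem.Set.ofList (x :: bs) : List String)
            = [x] ++ (PySem.Set.ofList bs).filter (fun y => !([x] : List String).contains y) by
        rw [PySem.Set.ofList_eq_foldl]; simp only [List.foldl_cons]
        rw [← add_nil x, ih (PySem.Set.add [] x), add_nil x]]
      simp only [PySem.Set.add, PySem.Set.contains, List.contains_eq_mem,
        List.filter_append, List.filter_filter, List.mem_singleton]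
      by_cases hx : x ∈ s
      · simp only [hx, decide_true, if_pos]
        congr 1
        rw [show List.filter (fun y => !decide (y ∈ s)) [x] = [] from by simp [hx],
            List.nil_append]
        apply List.filter_congr
        intro y _
        by_cases hyx : y = x
        · subst hyx; simp [hx]
        · simp [hyx]
      · simp only [hx, decide_false, Bool.false_eq_true, if_neg, not_false_iff,
          List.append_assoc]
        rw [show List.filter (fun y => !decide (y ∈ s)) [x] = [x] from by simp [hx]]
        congr 2
        apply List.filter_congr
        intro y _
        by_cases hyx : y = x
        · subst hyx; simp
        · simp [hyx, List.mem_append]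

-- dedup distributes over append: keep a's first occurrences, then b's not in a.
lemma dedup_append (a b : List String) :
    PySem.List.dedup (a ++ b)
      = PySem.List.dedup a ++ (PySem.List.dedup b).filter (fun x => !a.contains x) := by
  rw [PySem.List.dedup_eq_ofList, PySem.List.dedup_eq_ofList,
      PySem.Set.ofList_eq_foldl, PySem.Set.ofList_eq_foldl,
      List.foldl_append, foldl_add_rel]
  rw [← PySem.Set.ofList_eq_foldl, ← PySem.List.dedup_eq_ofList]
  congr 1
  apply List.filter_congr
  intro y _
  simp

-- Each single-item expansion is duplicate-free, so dedup leaves it unchanged.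
lemma dedup_exp (item : String) :
    PySem.List.dedup (DEFAULT_TOOLSETS.getD item [item]) = DEFAULT_TOOLSETS.getD item [item] := by
  simp only [DEFAULT_TOOLSETS, PySem.Dict.getD, PySem.Dict.get?]
  by_cases h1 : item = "filesystem"
  · subst h1; decide
  · by_cases h2 : item = "shell"
    · subst h2; decide
    · by_cases h3 : item = "git"
      · subst h3; decide
      · by_cases h4 : item = "delegation"
        · subst h4; decide
        · have e1 : ("filesystem" == item) = false := by simpa using Ne.symm h1
          have e2 : ("shell" == item) = false := by simpa using Ne.symm h2
          have e3 : ("git" == item) = false := by simpa using Ne.symm h3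
          have e4 : ("delegation" == item) = false := by simpa using Ne.symm h4
          simp [List.find?, e1, e2, e3, e4, PySem.List.dedup, PySem.Set.ofList,
                PySem.Set.add, PySem.Set.contains]

-- B's right fold computes the dedup of A's flattened expansion.
lemma alt_eq_dedup_flatMap (ts : List String) :
    expand_toolsets_alt ts
      = PySem.List.dedup (ts.flatMap (fun item => DEFAULT_TOOLSETS.getD item [item])) := by
  unfold expand_toolsets_alt
  rw [List.foldl_reverse]
  induction ts with
  | nil => rfl
  | cons t ts ih =>
      simp only [List.foldr_cons, List.flatMap_cons]
      rw [ih, dedup_append, dedup_exp]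

-- ===== VERDICT (by name: the statement is the Claim_ definition above) =====
theorem expand_toolsets_spec : Claim_equal_expand_toolsets := by
  intro ts _
  show expand_toolsets ts = expand_toolsets_alt ts
  unfold expand_toolsets
  rw [names_eq ts [], List.nil_append, alt_eq_dedup_flatMap]
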